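-- pv_equiv track=rewrite | github.com/jyooru/nix-minecraft-servers | ci/minecraft_servers/common.py | group_major_versions
-- ===== SOURCE A (Python) =====
-- from typing import Dict, List, Union
--
-- def get_major_release(version: str) -> str:
--     """
--     Return the major release for a version. The major release for 1.17 and
--     1.17.1 is 1.17.
--     """
--     if not len(version.split(".")) >= 2:
--         raise ValueError(f"version not in expected format: '{version}'")
--     return ".".join(version.split(".")[:2])
--
-- def group_major_versions(versions: List[str]) -> Dict[str, List[str]]:
--     """
--     Return a dictionary containing each version grouped by each major version.
--     The key "1.17" contains a list with two strings, one for "1.17" and another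
--     for "1.17.1".
--     """
--     groups: Dict[str, List[str]] = {}
--     for version in versions:
--         major_version = get_major_release(version)
--         if major_version not in groups:
--             groups[major_version] = []
--         groups[major_version].append(version)
--     return groups
-- ===== SOURCE B (Python) =====
-- def get_major_release(version: str) -> str:
--     parts = version.split(".")
--     if len(parts) < 2:
--         raise ValueError(f"version not in expected format: '{version}'")
--     return ".".join(parts[:2])
--
--
-- def group_major_versions(versions):
--     # map every version to its major release, in input order (raises in input
--     # order like the original), then take the distinct majors in first-occurrence
--     # order and collect each group by one filter pass per key.
--     majors = [get_major_release(v) for v in versions]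
--     keys = list(dict.fromkeys(majors))
--     return {k: [v for v, m in zip(versions, majors) if m == k] for k in keys}
-- ===== Notes on version B (the rewrite author's own statement) =====
-- stated objective: alternative
-- what changed: Replaces the single-pass dict accumulation with a map-to-majors pass, an ordered dedup of the majors (dict.fromkeys), and one filter pass per distinct major building the result as a dict comprehension.
import Mathlib
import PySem

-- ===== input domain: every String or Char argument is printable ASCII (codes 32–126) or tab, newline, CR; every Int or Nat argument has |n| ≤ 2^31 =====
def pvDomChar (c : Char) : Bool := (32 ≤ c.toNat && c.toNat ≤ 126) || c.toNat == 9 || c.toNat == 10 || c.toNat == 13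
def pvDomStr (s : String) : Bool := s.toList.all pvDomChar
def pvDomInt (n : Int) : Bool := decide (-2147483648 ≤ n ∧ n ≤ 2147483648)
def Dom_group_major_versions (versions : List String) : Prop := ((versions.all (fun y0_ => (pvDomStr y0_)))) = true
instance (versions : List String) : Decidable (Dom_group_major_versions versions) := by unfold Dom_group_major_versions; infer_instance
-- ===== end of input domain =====

-- B replaces A's single-pass dict accumulation with map-majors + ordered dedup of the
-- keys + one filter pass per key (objective: alternative; same values, same order).

-- ===== PORT A =====
-- version.split("."): split? is some for the non-empty separator "." (getD [] is never taken)
def pvSplit (version : String) : List String :=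
  (PySem.Str.split? version ".").getD []

-- get_major_release: the length-< 2 branch RAISES ValueError; those inputs are excluded by Pre_,
-- so the helper only ports the returning branch (".".join(version.split(".")[:2])).
def pvMajor (version : String) : String :=
  PySem.Str.join "." ((pvSplit version).take 2)

def group_major_versions (versions : List String) : List (String × List String) :=
  (versions.foldl
    (fun groups version =>
      let major_version := pvMajor version
      let groups := if groups.contains major_version then groups
                    else groups.insert major_version []
      groups.modify major_version [] (fun l => l ++ [version]))
    (PySem.Dict.empty : PySem.Dict String (List String))).items

-- ===== PORT B =====
def group_major_versions_alt (versions : List String) : List (String × List String) :=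
  let majors := versions.map pvMajor
  let keys := PySem.List.dedup majors
  keys.map (fun k =>
    (k, (versions.zip majors).filterMap (fun p => if p.2 == k then some p.1 else none)))

-- ===== PRECONDITION & SPEC =====
-- Pre_ excludes exactly the inputs on which the Python A raises ValueError:
-- a version with fewer than two '.'-separated fields (get_major_release raises there).
def Pre_group_major_versions (versions : List String) : Prop :=
  ∀ v ∈ versions, 2 ≤ (pvSplit v).length
instance (versions : List String) : Decidable (Pre_group_major_versions versions) := by
  unfold Pre_group_major_versions; infer_instance

def pvWitness_group_major_versions : List String := ["1.17", "1.17.1", "1.16.5"]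

def Spec_group_major_versions (versions : List String) (out : List (String × List String)) : Prop := out = group_major_versions_alt versions
instance (versions : List String) (out : List (String × List String)) : Decidable (Spec_group_major_versions versions out) := by unfold Spec_group_major_versions; infer_instance

-- ===== CLAIM (what is proved, stated in full; the proofs are below) =====
def Claim_equal_group_major_versions : Prop := ∀ (versions : List String), Dom_group_major_versions versions → Pre_group_major_versions versions → Spec_group_major_versions versions (group_major_versions versions)

-- ===== LEMMAS AND PROOFS =====

-- the grouping both programs compute: distinct majors in first-occurrence order,
-- each paired with the versions (in order) having that major
def pvG (p : List String) : List (String × List String) :=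
  (PySem.Set.ofList (p.map pvMajor)).map
    (fun k => (k, p.filter (fun v => pvMajor v == k)))

lemma pv_zip_filterMap (versions : List String) (k : String) :
    (versions.zip (versions.map pvMajor)).filterMap
      (fun p => if p.2 == k then some p.1 else none)
      = versions.filter (fun v => pvMajor v == k) := by
  induction versions with
  | nil => rfl
  | cons v vs ih =>
      simp only [List.map_cons, List.zip_cons_cons, List.filterMap_cons, List.filter_cons,
        ← ih]
      by_cases h : (pvMajor v == k) = true <;> simp [h]

lemma pv_alt_eq_G (versions : List String) :
    group_major_versions_alt versions = pvG versions := by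
  show (PySem.List.dedup (versions.map pvMajor)).map
      (fun k => (k, (versions.zip (versions.map pvMajor)).filterMap
        (fun p => if p.2 == k then some p.1 else none))) = pvG versions
  rw [PySem.List.dedup_eq_ofList]
  exact List.map_congr_left (fun k _ => by rw [pv_zip_filterMap])

lemma pv_keys_G (p : List String) :
    (pvG p).map Prod.fst = PySem.Set.ofList (p.map pvMajor) := by
  unfold pvG
  rw [List.map_map]
  simp [Function.comp_def]

lemma pv_filter_append (p : List String) (x k : String) :
    (p ++ [x]).filter (fun v => pvMajor v == k)
      = p.filter (fun v => pvMajor v == k) ++ (if pvMajor x == k then [x] else []) := by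
  rw [List.filter_append]
  by_cases h : (pvMajor x == k) = true <;> simp [h]

lemma pv_dict_ext (d e : PySem.Dict String (List String)) (h : d.items = e.items) : d = e := by
  cases d; cases e; cases h; rfl

lemma pv_mem_K_iff (p : List String) (k : String) :
    k ∈ PySem.Set.ofList (p.map pvMajor) ↔ k ∈ p.map pvMajor :=
  PySem.Set.mem_ofList _ _

set_option maxHeartbeats 1000000 in
lemma pv_stepG (p : List String) (x : String) :
    (let major_version := pvMajor x
     let groups := if (PySem.Dict.mk (pvG p)).contains major_version then (PySem.Dict.mk (pvG p))
                   else (PySem.Dict.mk (pvG p)).insert major_version []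
     groups.modify major_version [] (fun l => l ++ [x]))
      = PySem.Dict.mk (pvG (p ++ [x])) := by
  have hkeys : (PySem.Dict.mk (pvG p)).keys = PySem.Set.ofList (p.map pvMajor) := by
    rw [PySem.Dict.keys_mk]; exact pv_keys_G p
  have hnodup : (PySem.Dict.mk (pvG p)).keys.Nodup := by
    rw [hkeys]; exact PySem.Set.nodup_ofList _
  have hGapp : pvG (p ++ [x]) =
      ((PySem.Set.ofList (p.map pvMajor)).add (pvMajor x)).map
        (fun k => (k, p.filter (fun v => pvMajor v == k) ++ (if pvMajor x == k then [x] else []))) := by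
    unfold pvG
    rw [List.map_append, List.map_singleton, PySem.Set.ofList_append_singleton]
    exact List.map_congr_left (fun k _ => by rw [pv_filter_append])
  by_cases hmem : pvMajor x ∈ p.map pvMajor
  · -- the major is already a key: no insert, modify appends to its list
    have hc : (PySem.Dict.mk (pvG p)).contains (pvMajor x) = true := by
      rw [PySem.Dict.contains_eq_decide_mem_keys, hkeys]
      simpa [pv_mem_K_iff] using hmem
    have hitem : (pvMajor x, p.filter (fun v => pvMajor v == pvMajor x))
        ∈ (PySem.Dict.mk (pvG p)).items := by
      show _ ∈ pvG p
      unfold pvG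
      exact List.mem_map_of_mem ((pv_mem_K_iff p _).mpr hmem)
    have hgetD : (PySem.Dict.mk (pvG p)).getD (pvMajor x) []
        = p.filter (fun v => pvMajor v == pvMajor x) :=
      PySem.Dict.getD_of_mem_items _ hitem hnodup []
    have hadd : (PySem.Set.ofList (p.map pvMajor)).add (pvMajor x)
        = PySem.Set.ofList (p.map pvMajor) := by
      have hcs : (PySem.Set.ofList (p.map pvMajor)).contains (pvMajor x) = true :=
        (PySem.Set.contains_iff _ _).mpr ((pv_mem_K_iff p _).mpr hmem)
      unfold PySem.Set.add
      rw [hcs]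
      rfl
    simp only [hc, if_pos]
    apply pv_dict_ext
    show (PySem.Dict.modify (PySem.Dict.mk (pvG p)) (pvMajor x) [] (fun l => l ++ [x])).items
        = pvG (p ++ [x])
    unfold PySem.Dict.modify
    rw [hgetD, PySem.Dict.items_insert_of_contains _ _ hc, hGapp, hadd]
    show (pvG p).map _ = _
    unfold pvG
    rw [List.map_map]
    apply List.map_congr_left
    intro k _
    by_cases hk : k = pvMajor x
    · subst hk; simp
    · have hk2 : ¬ (pvMajor x = k) := fun h => hk h.symm
      simp [hk, hk2]
  · -- a new major: insert the empty list, then modify sets its list to [x]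
    have hc : (PySem.Dict.mk (pvG p)).contains (pvMajor x) = false := by
      rw [PySem.Dict.contains_eq_decide_mem_keys, hkeys]
      simpa [pv_mem_K_iff] using hmem
    have hd' : (PySem.Dict.mk (pvG p)).insert (pvMajor x) ([] : List String)
        = PySem.Dict.mk (pvG p ++ [(pvMajor x, [])]) :=
      pv_dict_ext _ _ (PySem.Dict.items_insert_of_not_contains _ _ hc)
    have hnotK : pvMajor x ∉ PySem.Set.ofList (p.map pvMajor) := by
      rw [pv_mem_K_iff]; exact hmem
    have hkeys' : (PySem.Dict.mk (pvG p ++ [(pvMajor x, [])])).keys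
        = PySem.Set.ofList (p.map pvMajor) ++ [pvMajor x] := by
      rw [PySem.Dict.keys_mk, List.map_append, pv_keys_G]
      rfl
    have hnodup' : (PySem.Dict.mk (pvG p ++ [(pvMajor x, [])])).keys.Nodup := by
      rw [hkeys']
      refine List.Nodup.append (PySem.Set.nodup_ofList _) (List.nodup_singleton _) ?_
      intro a ha hb
      rw [List.mem_singleton] at hb
      exact hnotK (hb ▸ ha)
    have hc' : (PySem.Dict.mk (pvG p ++ [(pvMajor x, [])])).contains (pvMajor x) = true := by
      rw [PySem.Dict.contains_eq_decide_mem_keys, hkeys']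
      simp
    have hgetD' : (PySem.Dict.mk (pvG p ++ [(pvMajor x, [])])).getD (pvMajor x) [] = [] :=
      PySem.Dict.getD_of_mem_items _ (by simp) hnodup' []
    have haddK : (PySem.Set.ofList (p.map pvMajor)).add (pvMajor x)
        = PySem.Set.ofList (p.map pvMajor) ++ [pvMajor x] := by
      have hcs : (PySem.Set.ofList (p.map pvMajor)).contains (pvMajor x) = false := by
        rw [Bool.eq_false_iff]
        intro hb
        exact hnotK ((PySem.Set.contains_iff _ _).mp hb)
      unfold PySem.Set.add
      rw [hcs]
      rfl
    have hfiltx : p.filter (fun v => pvMajor v == pvMajor x) = [] := by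
      rw [List.filter_eq_nil_iff]
      intro a ha h
      have ha' : pvMajor a = pvMajor x := by simpa using h
      exact hmem (ha' ▸ List.mem_map_of_mem ha)
    simp only [hc, Bool.false_eq_true, if_false]
    rw [hd']
    apply pv_dict_ext
    show (PySem.Dict.modify _ (pvMajor x) [] (fun l => l ++ [x])).items = pvG (p ++ [x])
    unfold PySem.Dict.modify
    rw [hgetD', PySem.Dict.items_insert_of_contains _ _ hc', hGapp, haddK]
    show (pvG p ++ [(pvMajor x, [])]).map _ = _
    rw [List.map_append, List.map_append, List.map_singleton, List.map_singleton]
    congr 1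
    · -- old entries are untouched: their keys differ from the new major
      unfold pvG
      rw [List.map_map]
      apply List.map_congr_left
      intro k hk
      have hkne : k ≠ pvMajor x := fun h => hnotK (h ▸ hk)
      have hkne2 : ¬ (pvMajor x = k) := fun h => hkne h.symm
      simp [hkne, hkne2]
    · simp [hfiltx]

-- the loop of A, started from the grouping of any already-processed prefix p
lemma pv_foldA (xs p : List String) :
    (xs.foldl
      (fun groups version =>
        let major_version := pvMajor version
        let groups := if groups.contains major_version then groups
                      else groups.insert major_version []
        groups.modify major_version [] (fun l => l ++ [version]))
      (PySem.Dict.mk (pvG p))) = PySem.Dict.mk (pvG (p ++ xs)) := by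
  induction xs generalizing p with
  | nil => simp
  | cons x xs ih =>
      rw [List.foldl_cons, pv_stepG p x, ih (p ++ [x])]
      simp

-- ===== VERDICT (by name: the statement is the Claim_ definition above) =====
theorem group_major_versions_spec : Claim_equal_group_major_versions := by
  intro versions _ _
  show group_major_versions versions = group_major_versions_alt versions
  rw [pv_alt_eq_G]
  unfold group_major_versions
  have : (PySem.Dict.empty : PySem.Dict String (List String)) = PySem.Dict.mk (pvG []) := rfl
  rw [this, pv_foldA versions []]
  simp
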